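-- pv_equiv track=rewrite | github.com/akshayshanker/Dyn-X | dynx/runner/metric_requirements.py | get_metric_requirements
-- ===== SOURCE A (Python) =====
-- from typing import Dict, List, Optional, Tuple
--
-- METRIC_REQUIREMENTS: Dict[str, Tuple[List[int], Dict[int, Optional[List[str]]]]] = {
--     # Euler error needs period 0 (OWNC) and period 1 (all stages)
--     "euler_error": ([0, 1], {0: ["OWNC"], 1: None}),
--
--     # Deviation metrics only need period 0 OWNC stage for comparison
--     "dev_c_L2": ([0], {0: ["OWNC"]}),
--     "dev_c_Linf": ([0], {0: ["OWNC"]}),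
--     "dev_a_L2": ([0], {0: ["OWNC"]}),
--     "dev_a_Linf": ([0], {0: ["OWNC"]}),
--     "dev_v_L2": ([0], {0: ["OWNC"]}),
--     "dev_v_Linf": ([0], {0: ["OWNC"]}),
--     "dev_pol_L2": ([0], {0: ["OWNC"]}),
--     "dev_pol_Linf": ([0], {0: ["OWNC"]}),
--
--     # Plotting metrics - EGM plots need OWNC from period 0
--     "plot_egm": ([0], {0: ["OWNC"]}),
--
--     # Policy plots need multiple stages from period 0
--     "plot_policy": ([0], {0: ["TENU", "OWNH", "OWNC", "RNTH", "RNTC"]}),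
--
--     # Value/Q function comparison plots need OWNC from period 0
--     "plot_value_q": ([0], {0: ["OWNC"]}),
--
--     # Comparison plot metrics (from metrics.py)
--     "plot_c_comparison": ([0], {0: ["OWNC"]}),
--     "plot_v_comparison": ([0], {0: ["OWNC"]}),
--     "plot_a_comparison": ([0], {0: ["OWNC"]}),
--     "plot_h_comparison": ([0], {0: ["OWNH"]}),
-- }
--
-- def get_metric_requirements(metric_names: List[str]) -> Tuple[List[int], Dict[int, Optional[List[str]]]]:
--     """
--     Get combined requirements for a list of metrics.
--
--     NOTE: With superset caching, this function is primarily used for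
--     documentation and understanding individual metric needs. The actual
--     caching uses get_superset_requirements() to ensure all metrics
--     share the same cached model.
--
--     Parameters
--     ----------
--     metric_names : List[str]
--         List of metric names to get requirements for
--
--     Returns
--     -------
--     periods_to_load : List[int]
--         Combined list of periods needed
--     stages_to_load : Dict[int, Optional[List[str]]]
--         Combined mapping of stages needed per period
--     """
--     if not metric_names:
--         return None, None
--
--     all_periods = set()
--     stages_by_period = {}
--
--     for metric in metric_names:
--         if metric in METRIC_REQUIREMENTS:
--             periods, stages = METRIC_REQUIREMENTS[metric]
--             all_periods.update(periods)
--
--             for period, stage_list in stages.items():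
--                 if period not in stages_by_period:
--                     stages_by_period[period] = set() if stage_list is not None else None
--
--                 if stage_list is not None and stages_by_period[period] is not None:
--                     stages_by_period[period].update(stage_list)
--                 elif stage_list is None:
--                     # If any metric needs all stages for a period, mark it as None
--                     stages_by_period[period] = None
--
--     # Convert sets back to lists
--     periods_to_load = sorted(list(all_periods))
--     stages_to_load = {
--         p: sorted(list(stages)) if stages is not None and isinstance(stages, set) else stages
--         for p, stages in stages_by_period.items()
--     }
--
--     return periods_to_load, stages_to_load
-- ===== SOURCE B (Python) =====
-- from typing import Dict, List, Optional, Tuple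
--
-- METRIC_REQUIREMENTS: Dict[str, Tuple[List[int], Dict[int, Optional[List[str]]]]] = {
--     "euler_error": ([0, 1], {0: ["OWNC"], 1: None}),
--     "dev_c_L2": ([0], {0: ["OWNC"]}),
--     "dev_c_Linf": ([0], {0: ["OWNC"]}),
--     "dev_a_L2": ([0], {0: ["OWNC"]}),
--     "dev_a_Linf": ([0], {0: ["OWNC"]}),
--     "dev_v_L2": ([0], {0: ["OWNC"]}),
--     "dev_v_Linf": ([0], {0: ["OWNC"]}),
--     "dev_pol_L2": ([0], {0: ["OWNC"]}),
--     "dev_pol_Linf": ([0], {0: ["OWNC"]}),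
--     "plot_egm": ([0], {0: ["OWNC"]}),
--     "plot_policy": ([0], {0: ["TENU", "OWNH", "OWNC", "RNTH", "RNTC"]}),
--     "plot_value_q": ([0], {0: ["OWNC"]}),
--     "plot_c_comparison": ([0], {0: ["OWNC"]}),
--     "plot_v_comparison": ([0], {0: ["OWNC"]}),
--     "plot_a_comparison": ([0], {0: ["OWNC"]}),
--     "plot_h_comparison": ([0], {0: ["OWNH"]}),
-- }
--
-- def get_metric_requirements(metric_names):
--     """Gather-then-reduce: collect per-period contributions in one sweep,
--     then reduce each period (None absorbs; otherwise sorted union)."""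
--     if not metric_names:
--         return None, None
--     known = [METRIC_REQUIREMENTS[m] for m in metric_names if m in METRIC_REQUIREMENTS]
--     periods_to_load = sorted({p for periods, _ in known for p in periods})
--     contribs = [(p, sl) for _, stages in known for p, sl in stages.items()]
--     by_period = {}
--     for p, sl in contribs:
--         by_period.setdefault(p, []).append(sl)
--     stages_to_load = {}
--     for p, lst in by_period.items():
--         if any(s is None for s in lst):
--             stages_to_load[p] = None
--         else:
--             names = set()
--             for s in lst:
--                 names.update(s)
--             stages_to_load[p] = sorted(names)
--     return periods_to_load, stages_to_load
-- ===== Notes on version B (the rewrite author's own statement) =====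
-- stated objective: alternative
-- what changed: Replaces A's single pass that merges stage sets in place with None-absorption during the loop by a gather-then-reduce decomposition: filter known metrics, collect all (period, stage_list) contributions, group them per period, then reduce each period independently (None absorbs, otherwise sorted union).
import Mathlib
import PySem

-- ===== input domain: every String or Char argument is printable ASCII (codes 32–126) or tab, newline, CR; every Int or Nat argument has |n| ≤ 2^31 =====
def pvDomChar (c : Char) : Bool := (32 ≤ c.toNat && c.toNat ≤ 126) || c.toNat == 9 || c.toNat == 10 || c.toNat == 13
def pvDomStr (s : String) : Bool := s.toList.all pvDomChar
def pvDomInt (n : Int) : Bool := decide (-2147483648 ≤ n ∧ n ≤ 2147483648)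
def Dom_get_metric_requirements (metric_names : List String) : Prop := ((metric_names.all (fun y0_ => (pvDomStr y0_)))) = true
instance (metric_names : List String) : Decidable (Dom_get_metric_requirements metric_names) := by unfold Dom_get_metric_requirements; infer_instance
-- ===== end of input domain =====

-- B replaces A's single in-place merging pass by a gather-then-reduce decomposition
-- (collect per-period contributions, then reduce each period); same cost, alternative structure.


-- ===== PORT A =====
-- the module constant METRIC_REQUIREMENTS (shared data for both ports);
-- each stage dict literal is stored as its items list (iteration order = literal order)
def METRIC_REQUIREMENTS : PySem.Dict String (List Int × List (Int × Option (List String))) :=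
  PySem.Dict.ofList [
    ("euler_error", ([0, 1], [(0, some ["OWNC"]), (1, none)])),
    ("dev_c_L2", ([0], [(0, some ["OWNC"])])),
    ("dev_c_Linf", ([0], [(0, some ["OWNC"])])),
    ("dev_a_L2", ([0], [(0, some ["OWNC"])])),
    ("dev_a_Linf", ([0], [(0, some ["OWNC"])])),
    ("dev_v_L2", ([0], [(0, some ["OWNC"])])),
    ("dev_v_Linf", ([0], [(0, some ["OWNC"])])),
    ("dev_pol_L2", ([0], [(0, some ["OWNC"])])),
    ("dev_pol_Linf", ([0], [(0, some ["OWNC"])])),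
    ("plot_egm", ([0], [(0, some ["OWNC"])])),
    ("plot_policy", ([0], [(0, some ["TENU", "OWNH", "OWNC", "RNTH", "RNTC"])])),
    ("plot_value_q", ([0], [(0, some ["OWNC"])])),
    ("plot_c_comparison", ([0], [(0, some ["OWNC"])])),
    ("plot_v_comparison", ([0], [(0, some ["OWNC"])])),
    ("plot_a_comparison", ([0], [(0, some ["OWNC"])])),
    ("plot_h_comparison", ([0], [(0, some ["OWNH"])]))]

-- A's inner-loop body: one (period, stage_list) item merged into stages_by_period
def pvStageStep (d : PySem.Dict Int (Option (PySem.Set String)))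
    (x : Int × Option (List String)) : PySem.Dict Int (Option (PySem.Set String)) :=
  -- if period not in stages_by_period: stages_by_period[period] = set() / None
  let d := if d.contains x.1 then d
           else d.insert x.1 (match x.2 with | some _ => some PySem.Set.empty | none => none)
  match x.2, d.getD x.1 none with
  | some sl, some cur => d.insert x.1 (some (PySem.Set.update cur sl))   -- .update(stage_list)
  | some _, none => d
  | none, _ => d.insert x.1 none                                         -- mark as None

def get_metric_requirements (metric_names : List String) :
    Option (List Int) × (Option (List (Int × Option (List String)))) :=
  if metric_names = [] then (none, none)
  else
    let st := metric_names.foldl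
      (fun (s : PySem.Set Int × PySem.Dict Int (Option (PySem.Set String))) metric =>
        match METRIC_REQUIREMENTS.get? metric with
        | none => s
        | some pr => (PySem.Set.update s.1 pr.1, pr.2.foldl pvStageStep s.2))
      (PySem.Set.empty, PySem.Dict.empty)
    let periods_to_load := PySem.List.sorted st.1 (fun x => x) false
    -- dict comprehension: sorted(list(stages)) if stages is not None else stages
    let stages_to_load := st.2.items.foldl
      (fun (o : PySem.Dict Int (Option (List String))) pv =>
        o.insert pv.1 (pv.2.map (fun s => PySem.List.sorted s (fun x => x) false)))
      PySem.Dict.empty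
    (some periods_to_load, some stages_to_load.items)

-- ===== PORT B =====
def get_metric_requirements_alt (metric_names : List String) :
    Option (List Int) × (Option (List (Int × Option (List String)))) :=
  if metric_names = [] then (none, none)
  else
    let known := metric_names.filterMap (fun m => METRIC_REQUIREMENTS.get? m)
    let periods_to_load :=
      PySem.List.sorted (PySem.Set.ofList (known.flatMap (fun v => v.1))) (fun x => x) false
    let contribs := known.flatMap (fun v => v.2)
    let by_period := contribs.foldl
      (fun (d : PySem.Dict Int (List (Option (List String)))) p =>
        d.modify p.1 [] (fun x => x ++ [p.2]))                -- setdefault(p, []).append(sl)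
      PySem.Dict.empty
    let stages_to_load := by_period.items.foldl
      (fun (o : PySem.Dict Int (Option (List String))) pl =>
        o.insert pl.1
          (if pl.2.any (fun s => s.isNone) then none
           else some (PySem.List.sorted
             -- names.update(s); s is never None in this branch, so getD [] is exact here
             (pl.2.foldl (fun s o => PySem.Set.update s (o.getD [])) PySem.Set.empty)
             (fun x => x) false)))
      PySem.Dict.empty
    (some periods_to_load, some stages_to_load.items)

-- ===== PRECONDITION & SPEC =====
def Spec_get_metric_requirements (metric_names : List String) (out : Option (List Int) × (Option (List (Int × Option (List String))))) : Prop := out = get_metric_requirements_alt metric_names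
instance (metric_names : List String) (out : Option (List Int) × (Option (List (Int × Option (List String))))) : Decidable (Spec_get_metric_requirements metric_names out) := by unfold Spec_get_metric_requirements; infer_instance

-- ===== CLAIM (what is proved, stated in full; the proofs are below) =====
def Claim_equal_get_metric_requirements : Prop := ∀ (metric_names : List String), Dom_get_metric_requirements metric_names → Spec_get_metric_requirements metric_names (get_metric_requirements metric_names)

-- ===== LEMMAS AND PROOFS =====

-- the combining function pvStageStep realises on the stored value at its key
def pvComb (v : Option (PySem.Set String)) (sl : Option (List String)) : Option (PySem.Set String) :=
  match sl with
  | none => none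
  | some l => v.map (fun s => PySem.Set.update s l)

theorem pvComb_none_left (sl : Option (List String)) : pvComb none sl = none := by
  cases sl <;> rfl

theorem pvStageStep_get? (d : PySem.Dict Int (Option (PySem.Set String)))
    (x : Int × Option (List String)) (q : Int) :
    (pvStageStep d x).get? q =
      if q = x.1 then some (pvComb ((d.get? x.1).getD (some PySem.Set.empty)) x.2)
      else d.get? q := by
  unfold pvStageStep
  by_cases hc : d.contains x.1 = true
  · rw [PySem.Dict.contains_eq_isSome_get?] at hc
    obtain ⟨v, hv⟩ := Option.isSome_iff_exists.mp hc
    have hcd : d.contains x.1 = true := by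
      rw [PySem.Dict.contains_eq_isSome_get?, hv]; rfl
    have hgd : d.getD x.1 none = v := by
      rw [PySem.Dict.getD_eq_get?_getD, hv]; rfl
    cases hx : x.2 with
    | none =>
      simp only [hcd, if_true]
      rw [PySem.Dict.get?_insert]
      simp [pvComb]
    | some sl =>
      cases v with
      | none =>
        simp only [hcd, if_true, hgd]
        simp only [pvComb, hv, Option.getD_some, Option.map_none]
        split
        · next h => subst h; rw [hv]
        · rfl
      | some cur =>
        simp only [hcd, if_true, hgd]
        rw [PySem.Dict.get?_insert]
        simp [pvComb, hv]
  · simp only [Bool.not_eq_true] at hc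
    have hv : d.get? x.1 = none := by
      have h2 := PySem.Dict.contains_eq_isSome_get? d x.1
      rw [hc] at h2
      exact Option.not_isSome_iff_eq_none.mp (by rw [← h2]; simp)
    cases hx : x.2 with
    | none =>
      simp only [hc, Bool.false_eq_true, if_false]
      rw [PySem.Dict.insert_insert_self, PySem.Dict.get?_insert]
      simp [pvComb]
    | some sl =>
      simp only [hc, Bool.false_eq_true, if_false]
      have hg1 : (d.insert x.1 (some PySem.Set.empty)).getD x.1 none = some PySem.Set.empty := by
        rw [PySem.Dict.getD_eq_get?_getD, PySem.Dict.get?_insert_self]; rfl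
      simp only [hg1]
      rw [PySem.Dict.insert_insert_self, PySem.Dict.get?_insert]
      simp [pvComb, hv]

theorem pvStageStep_keys (d : PySem.Dict Int (Option (PySem.Set String)))
    (x : Int × Option (List String)) :
    (pvStageStep d x).keys = PySem.Set.add d.keys x.1 := by
  unfold pvStageStep
  by_cases hc : d.contains x.1 = true
  · have hmem : x.1 ∈ d.keys := (PySem.Dict.contains_iff_mem_keys d x.1).mp hc
    rw [PySem.Set.add_of_mem hmem]
    simp only [hc, if_true]
    cases hx : x.2 with
    | none => rw [PySem.Dict.keys_insert_of_contains _ _ hc]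
    | some sl =>
      cases hg : d.getD x.1 none with
      | none => rfl
      | some cur => rw [PySem.Dict.keys_insert_of_contains _ _ hc]
  · simp only [Bool.not_eq_true] at hc
    have hmem : x.1 ∉ d.keys := fun h => by
      rw [(PySem.Dict.contains_iff_mem_keys d x.1).mpr h] at hc; cases hc
    rw [PySem.Set.add_of_not_mem hmem]
    simp only [hc, Bool.false_eq_true, if_false]
    cases hx : x.2 with
    | none =>
      rw [PySem.Dict.insert_insert_self, PySem.Dict.keys_insert_of_not_contains _ _ hc]
    | some sl =>
      have hg1 : (d.insert x.1 (some PySem.Set.empty)).getD x.1 none = some PySem.Set.empty := by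
        rw [PySem.Dict.getD_eq_get?_getD, PySem.Dict.get?_insert_self]; rfl
      simp only [hg1]
      rw [PySem.Dict.insert_insert_self, PySem.Dict.keys_insert_of_not_contains _ _ hc]

theorem foldl_pvStageStep_get? (l : List (Int × Option (List String)))
    (d : PySem.Dict Int (Option (PySem.Set String))) (q : Int) :
    (l.foldl pvStageStep d).get? q =
      (l.filter (fun x => x.1 == q)).foldl
        (fun w x => some (pvComb (w.getD (some PySem.Set.empty)) x.2)) (d.get? q) := by
  induction l generalizing d with
  | nil => rfl
  | cons x rest ih =>
    rw [List.foldl_cons, ih, pvStageStep_get?]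
    simp only [List.filter_cons]
    by_cases hxq : x.1 = q
    · simp [hxq]
    · have hq : ¬ (q = x.1) := fun h => hxq h.symm
      simp [hxq, hq]

theorem foldl_pvStageStep_keys (l : List (Int × Option (List String)))
    (d : PySem.Dict Int (Option (PySem.Set String))) :
    (l.foldl pvStageStep d).keys = PySem.Set.update d.keys (l.map (fun x => x.1)) := by
  induction l generalizing d with
  | nil => rfl
  | cons x rest ih =>
    rw [List.foldl_cons, ih, pvStageStep_keys, List.map_cons, PySem.Set.update_cons]

-- split A's pair-state fold into the two folds over the known entries
theorem foldl_A_split (names : List String)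
    (s : PySem.Set Int × PySem.Dict Int (Option (PySem.Set String))) :
    names.foldl
      (fun (s : PySem.Set Int × PySem.Dict Int (Option (PySem.Set String))) metric =>
        match METRIC_REQUIREMENTS.get? metric with
        | none => s
        | some pr => (PySem.Set.update s.1 pr.1, pr.2.foldl pvStageStep s.2)) s =
    (PySem.Set.update s.1 ((names.filterMap (fun m => METRIC_REQUIREMENTS.get? m)).flatMap (fun v => v.1)),
     ((names.filterMap (fun m => METRIC_REQUIREMENTS.get? m)).flatMap (fun v => v.2)).foldl pvStageStep s.2) := by
  induction names generalizing s with
  | nil => rfl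
  | cons m rest ih =>
    rw [List.foldl_cons]
    cases hm : METRIC_REQUIREMENTS.get? m with
    | none => simp only [hm, List.filterMap_cons, ih]
    | some pr =>
      simp only [hm, List.filterMap_cons, List.flatMap_cons]
      rw [ih, PySem.Set.update_append, List.foldl_append]

-- the comb-wrapped fold from `none` (nonempty list) is pvComb folded from `some ∅`
theorem foldl_combW (seq : List (Int × Option (List String))) (w : Option (Option (PySem.Set String)))
    (h : seq ≠ []) :
    seq.foldl (fun w x => some (pvComb (w.getD (some PySem.Set.empty)) x.2)) w =
      some (seq.foldl (fun v x => pvComb v x.2) (w.getD (some PySem.Set.empty))) := by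
  induction seq generalizing w with
  | nil => exact absurd rfl h
  | cons x rest ih =>
    by_cases hr : rest = []
    · subst hr; rfl
    · rw [List.foldl_cons, ih _ hr, List.foldl_cons]
      rfl

theorem foldl_pvComb_none (seq : List (Int × Option (List String))) :
    seq.foldl (fun v x => pvComb v x.2) none = none := by
  induction seq with
  | nil => rfl
  | cons x rest ih => rw [List.foldl_cons, pvComb_none_left]; exact ih

theorem foldl_pvComb_some (seq : List (Int × Option (List String))) (s : PySem.Set String) :
    seq.foldl (fun v x => pvComb v x.2) (some s) =
      if seq.any (fun x => x.2.isNone) then none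
      else some (seq.foldl (fun s x => PySem.Set.update s (x.2.getD [])) s) := by
  induction seq generalizing s with
  | nil => rfl
  | cons x rest ih =>
    cases hx : x.2 with
    | none =>
      rw [List.foldl_cons]
      show List.foldl _ (pvComb (some s) x.2) rest = _
      rw [hx]
      show List.foldl _ none rest = _
      rw [foldl_pvComb_none]
      simp [hx]
    | some l =>
      rw [List.foldl_cons]
      show List.foldl _ (pvComb (some s) x.2) rest = _
      rw [hx]
      show List.foldl _ (some (PySem.Set.update s l)) rest = _
      rw [ih]
      simp only [List.any_cons, List.foldl_cons, hx, Option.isNone_some, Bool.false_or, Option.getD_some]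

-- per-key agreement of the two stage computations
theorem pv_value_eq (contribs : List (Int × Option (List String))) (k : Int)
    (hk : k ∈ contribs.map (fun x => x.1)) :
    ((contribs.foldl pvStageStep PySem.Dict.empty).getD k none).map
        (fun s => PySem.List.sorted s (fun x => x) false) =
      (if ((contribs.filter (fun x => x.1 == k)).map (fun x => x.2)).any (fun s => s.isNone) then none
       else some (PySem.List.sorted
         (((contribs.filter (fun x => x.1 == k)).map (fun x => x.2)).foldl
           (fun s o => PySem.Set.update s (o.getD [])) PySem.Set.empty)
         (fun x => x) false)) := by
  have hne : contribs.filter (fun x => x.1 == k) ≠ [] := by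
    obtain ⟨x, hx, hxk⟩ := List.exists_of_mem_map hk
    exact List.ne_nil_of_mem (List.mem_filter.mpr ⟨hx, by simp [hxk]⟩)
  rw [PySem.Dict.getD_eq_get?_getD, foldl_pvStageStep_get?, PySem.Dict.get?_empty,
    foldl_combW _ _ hne]
  rw [Option.getD_some, Option.getD_none, foldl_pvComb_some, List.any_map, List.foldl_map]
  simp only [Function.comp_def]
  split <;> rfl

-- the second components agree for every non-empty input
theorem pv_main (names : List String) (h : names ≠ []) :
    get_metric_requirements names = get_metric_requirements_alt names := by
  unfold get_metric_requirements get_metric_requirements_alt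
  simp only [h, if_false]
  rw [foldl_A_split]
  set known := names.filterMap (fun m => METRIC_REQUIREMENTS.get? m) with hknown
  set contribs := known.flatMap (fun v => v.2) with hcontribs
  set D := contribs.foldl pvStageStep PySem.Dict.empty with hD
  set B := contribs.foldl
      (fun (d : PySem.Dict Int (List (Option (List String)))) p =>
        d.modify p.1 [] (fun x => x ++ [p.2])) PySem.Dict.empty with hB
  have hupd : (PySem.Set.update (PySem.Set.empty : PySem.Set Int) (known.flatMap (fun v => v.1)))
      = PySem.Set.ofList (known.flatMap (fun v => v.1)) := PySem.Set.update_nil_left _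
  have hkeysD : D.keys = PySem.Set.ofList (contribs.map (fun x => x.1)) := by
    rw [hD, foldl_pvStageStep_keys]
    exact PySem.Set.update_nil_left _
  have hndD : D.keys.Nodup := by rw [hkeysD]; exact PySem.Set.nodup_ofList _
  have hkeysB : B.keys = PySem.Set.ofList (contribs.map (fun x => x.1)) := by
    rw [hB, PySem.Dict.keys_foldl_modify_key contribs (fun p => p.1) []
      (fun _ p => fun x => x ++ [p.2]) PySem.Dict.empty]
    exact PySem.Set.update_nil_left _
  have hndB : B.keys.Nodup := by rw [hkeysB]; exact PySem.Set.nodup_ofList _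
  have hgetB : ∀ k, B.getD k [] = (contribs.filter (fun p => p.1 == k)).map (fun x => x.2) := by
    intro k
    rw [hB, PySem.Dict.getD_foldl_modify_append, PySem.Dict.getD_empty, List.nil_append]
  have hitemsD : D.items = D.keys.map (fun k => (k, D.getD k none)) :=
    PySem.Dict.items_eq_map_keys D hndD none
  have hitemsB : B.items = B.keys.map (fun k => (k, B.getD k [])) :=
    PySem.Dict.items_eq_map_keys B hndB []
  have hfinA : (D.items.foldl
      (fun (o : PySem.Dict Int (Option (List String))) pv =>
        o.insert pv.1 (pv.2.map (fun s => PySem.List.sorted s (fun x => x) false)))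
      PySem.Dict.empty).items =
      D.items.map (fun pv => (pv.1, pv.2.map (fun s => PySem.List.sorted s (fun x => x) false))) := by
    rw [PySem.Dict.items_foldl_insert_fresh D.items (fun pv => pv.1)
      (fun pv => pv.2.map (fun s => PySem.List.sorted s (fun x => x) false)) PySem.Dict.empty
      (fun a _ => PySem.Dict.contains_empty a.1) hndD]
    rfl
  have hfinB : (B.items.foldl
      (fun (o : PySem.Dict Int (Option (List String))) pl =>
        o.insert pl.1
          (if pl.2.any (fun s => s.isNone) then none
           else some (PySem.List.sorted
             (pl.2.foldl (fun s o => PySem.Set.update s (o.getD [])) PySem.Set.empty)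
             (fun x => x) false)))
      PySem.Dict.empty).items =
      B.items.map (fun pl => (pl.1,
        if pl.2.any (fun s => s.isNone) then none
        else some (PySem.List.sorted
          (pl.2.foldl (fun s o => PySem.Set.update s (o.getD [])) PySem.Set.empty)
          (fun x => x) false))) := by
    rw [PySem.Dict.items_foldl_insert_fresh B.items (fun pl => pl.1) _ PySem.Dict.empty
      (fun a _ => PySem.Dict.contains_empty a.1) hndB]
    rfl
  refine Prod.ext ?_ ?_
  · show some _ = some _
    rw [hupd]
  · show some _ = some _
    congr 1
    rw [hfinA, hfinB, hitemsD, hitemsB, List.map_map, List.map_map, hkeysD, hkeysB]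
    refine List.map_congr_left ?_
    intro k hkmem
    have hk : k ∈ contribs.map (fun x => x.1) := (PySem.Set.mem_ofList _ _).mp hkmem
    have := pv_value_eq contribs k hk
    simp only [Function.comp_def]
    rw [hgetB k]
    exact congrArg (fun v => (k, v)) (by rw [← hD] at this; exact this)

-- ===== VERDICT (by name: the statement is the Claim_ definition above) =====
theorem get_metric_requirements_spec : Claim_equal_get_metric_requirements := by
  intro names _
  unfold Spec_get_metric_requirements
  by_cases h : names = []
  · subst h; rfl
  · exact pv_main names h
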